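-- pv_equiv track=rewrite | github.com/mazamizo21/NeuroSploit-SaaS-v2 | kali-executor/open-interpreter/tool_phase_map.py | _filter_known_phases
-- ===== SOURCE A (Python) =====
-- from typing import Dict, Iterable, List, Optional, Set
--
-- INTERNAL_PHASES: List[str] = [
--     "RECON",
--     "VULN_DISCOVERY",
--     "EXPLOITATION",
--     "C2_DEPLOY",
--     "POST_EXPLOIT",
-- ]
--
-- def _filter_known_phases(phases: Iterable[str]) -> List[str]:
--     allowed_set = {p for p in INTERNAL_PHASES}
--     out: List[str] = []
--     for p in phases:
--         pn = str(p or "").strip().upper()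
--         if pn in allowed_set and pn not in out:
--             out.append(pn)
--     # Preserve INTERNAL_PHASES ordering for deterministic outputs.
--     out.sort(key=lambda p: INTERNAL_PHASES.index(p) if p in INTERNAL_PHASES else 999)
--     return out
-- ===== SOURCE B (Python) =====
-- from typing import Iterable, List
--
-- INTERNAL_PHASES: List[str] = [
--     "RECON",
--     "VULN_DISCOVERY",
--     "EXPLOITATION",
--     "C2_DEPLOY",
--     "POST_EXPLOIT",
-- ]
--
-- def _filter_known_phases(phases: Iterable[str]) -> List[str]:
--     present = {str(p or "").strip().upper() for p in phases}
--     return [ph for ph in INTERNAL_PHASES if ph in present]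
-- ===== Notes on version B (the rewrite author's own statement) =====
-- stated objective: simpler
-- what changed: B builds a set of normalized inputs in one pass and then walks the fixed INTERNAL_PHASES list collecting members, which removes A's manual 'not in out' dedup scan and its final index-keyed sort.
import Mathlib
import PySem

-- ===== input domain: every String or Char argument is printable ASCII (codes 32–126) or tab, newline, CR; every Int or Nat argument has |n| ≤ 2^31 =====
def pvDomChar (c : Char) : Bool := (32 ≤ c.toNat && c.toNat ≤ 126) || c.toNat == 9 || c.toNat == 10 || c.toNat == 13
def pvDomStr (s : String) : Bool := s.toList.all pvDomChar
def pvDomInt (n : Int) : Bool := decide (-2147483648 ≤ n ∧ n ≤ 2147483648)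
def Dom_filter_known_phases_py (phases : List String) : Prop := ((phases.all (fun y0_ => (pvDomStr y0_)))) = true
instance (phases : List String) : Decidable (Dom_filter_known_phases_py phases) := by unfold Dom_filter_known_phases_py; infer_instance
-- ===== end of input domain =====

-- B replaces A's append-with-dedup loop plus index-keyed sort by one normalized set and a single
-- pass over the fixed INTERNAL_PHASES list (objective: simpler).

-- ===== PORT A =====
-- INTERNAL_PHASES from the Python module
def pvINTERNAL_PHASES : List String :=
  ["RECON", "VULN_DISCOVERY", "EXPLOITATION", "C2_DEPLOY", "POST_EXPLOIT"]

-- str(p or "").strip().upper()  (on str, 'p or ""' is p unless p is empty; str() is identity)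
def pvNorm (p : String) : String :=
  PySem.Str.upper (PySem.Str.strip (if p == "" then "" else p))

def filter_known_phases_py (phases : List String) : List String :=
  let allowed_set : PySem.Set String := PySem.Set.ofList pvINTERNAL_PHASES
  let out := phases.foldl (fun (out : List String) p =>
    let pn := pvNorm p
    if PySem.Set.contains allowed_set pn && !(List.contains out pn) then out ++ [pn] else out) []
  PySem.List.sorted out
    (fun p => if p ∈ pvINTERNAL_PHASES
              then (((PySem.List.index? pvINTERNAL_PHASES p).getD 0 : Nat) : Int)
              else 999) false

-- ===== PORT B =====
def filter_known_phases_py_alt (phases : List String) : List String :=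
  let present : PySem.Set String := PySem.Set.ofList (phases.map pvNorm)
  pvINTERNAL_PHASES.filter (fun ph => PySem.Set.contains present ph)

-- ===== PRECONDITION & SPEC =====
def Spec_filter_known_phases_py (phases : List String) (out : List String) : Prop := out = filter_known_phases_py_alt phases
instance (phases : List String) (out : List String) : Decidable (Spec_filter_known_phases_py phases out) := by unfold Spec_filter_known_phases_py; infer_instance

-- ===== CLAIM (what is proved, stated in full; the proofs are below) =====
def Claim_equal_filter_known_phases_py : Prop := ∀ (phases : List String), Dom_filter_known_phases_py phases → Spec_filter_known_phases_py phases (filter_known_phases_py phases)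

-- ===== LEMMAS AND PROOFS =====

-- A's loop: the accumulator stays duplicate-free and collects exactly the allowed normalized inputs.
lemma pvLoopA (l : List String) (acc : List String) (hnd : acc.Nodup) :
    (l.foldl (fun (out : List String) p =>
        let pn := pvNorm p
        if PySem.Set.contains (PySem.Set.ofList pvINTERNAL_PHASES) pn && !(List.contains out pn)
        then out ++ [pn] else out) acc).Nodup ∧
    ∀ x, x ∈ (l.foldl (fun (out : List String) p =>
        let pn := pvNorm p
        if PySem.Set.contains (PySem.Set.ofList pvINTERNAL_PHASES) pn && !(List.contains out pn)
        then out ++ [pn] else out) acc) ↔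
      x ∈ acc ∨ (x ∈ pvINTERNAL_PHASES ∧ x ∈ l.map pvNorm) := by
  induction l generalizing acc with
  | nil => simp [hnd]
  | cons p t ih =>
    simp only [List.foldl_cons]
    by_cases hmem : pvNorm p ∈ pvINTERNAL_PHASES
    · by_cases hin : pvNorm p ∈ acc
      · have hcond : (PySem.Set.contains (PySem.Set.ofList pvINTERNAL_PHASES) (pvNorm p)
            && !(List.contains acc (pvNorm p))) = false := by
          simp [PySem.Set.contains, PySem.Set.mem_ofList, hin]
        simp only [hcond, Bool.false_eq_true, if_false]
        obtain ⟨h1, h2⟩ := ih acc hnd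
        refine ⟨h1, fun x => ?_⟩
        rw [h2]
        constructor
        · rintro (hx | ⟨hx1, hx2⟩)
          · exact Or.inl hx
          · exact Or.inr ⟨hx1, by simp [hx2]⟩
        · rintro (hx | ⟨hx1, hx2⟩)
          · exact Or.inl hx
          · simp only [List.map_cons, List.mem_cons] at hx2
            rcases hx2 with hx2 | hx2
            · exact Or.inl (hx2 ▸ hin)
            · exact Or.inr ⟨hx1, hx2⟩
      · have hcond : (PySem.Set.contains (PySem.Set.ofList pvINTERNAL_PHASES) (pvNorm p)
            && !(List.contains acc (pvNorm p))) = true := by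
          simp [PySem.Set.contains, PySem.Set.mem_ofList, hmem, hin]
        simp only [hcond, if_true]
        have hnd' : (acc ++ [pvNorm p]).Nodup := by
          simp only [List.nodup_append, List.nodup_singleton]
          refine ⟨hnd, trivial, ?_⟩
          intro a ha b hb
          simp only [List.mem_singleton] at hb
          subst hb
          exact fun h => hin (h ▸ ha)
        obtain ⟨h1, h2⟩ := ih (acc ++ [pvNorm p]) hnd'
        refine ⟨h1, fun x => ?_⟩
        rw [h2]
        constructor
        · rintro (hx | ⟨hx1, hx2⟩)
          · simp only [List.mem_append, List.mem_singleton] at hx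
            rcases hx with hx | hx
            · exact Or.inl hx
            · exact Or.inr ⟨hx ▸ hmem, by simp [hx]⟩
          · exact Or.inr ⟨hx1, by simp [hx2]⟩
        · rintro (hx | ⟨hx1, hx2⟩)
          · exact Or.inl (by simp [hx])
          · simp only [List.map_cons, List.mem_cons] at hx2
            rcases hx2 with hx2 | hx2
            · exact Or.inl (by simp [hx2])
            · exact Or.inr ⟨hx1, hx2⟩
    · have hcond : (PySem.Set.contains (PySem.Set.ofList pvINTERNAL_PHASES) (pvNorm p)
          && !(List.contains acc (pvNorm p))) = false := by
        simp [PySem.Set.contains, PySem.Set.mem_ofList, hmem]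
      simp only [hcond, Bool.false_eq_true, if_false]
      obtain ⟨h1, h2⟩ := ih acc hnd
      refine ⟨h1, fun x => ?_⟩
      rw [h2]
      constructor
      · rintro (hx | ⟨hx1, hx2⟩)
        · exact Or.inl hx
        · exact Or.inr ⟨hx1, by simp [hx2]⟩
      · rintro (hx | ⟨hx1, hx2⟩)
        · exact Or.inl hx
        · simp only [List.map_cons, List.mem_cons] at hx2
          rcases hx2 with hx2 | hx2
          · exact absurd (hx2 ▸ hx1) hmem
          · exact Or.inr ⟨hx1, hx2⟩

-- membership in B's result
lemma pvMemB (phases : List String) (x : String) :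
    x ∈ filter_known_phases_py_alt phases ↔ x ∈ pvINTERNAL_PHASES ∧ x ∈ phases.map pvNorm := by
  simp [filter_known_phases_py_alt, List.mem_filter, PySem.Set.contains, PySem.Set.mem_ofList]

lemma pvNodupB (phases : List String) : (filter_known_phases_py_alt phases).Nodup := by
  have h : pvINTERNAL_PHASES.Nodup := by decide
  exact h.filter _

-- ===== VERDICT (by name: the statement is the Claim_ definition above) =====
theorem filter_known_phases_py_spec : Claim_equal_filter_known_phases_py := by
  intro phases _
  unfold Spec_filter_known_phases_py
  unfold filter_known_phases_py
  simp only []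
  obtain ⟨hnd, hmem⟩ := pvLoopA phases [] List.nodup_nil
  have hperm : (filter_known_phases_py_alt phases).Perm
      (phases.foldl (fun (out : List String) p =>
        let pn := pvNorm p
        if PySem.Set.contains (PySem.Set.ofList pvINTERNAL_PHASES) pn && !(List.contains out pn)
        then out ++ [pn] else out) []) := by
    rw [List.perm_ext_iff_of_nodup (pvNodupB phases) hnd]
    intro a
    rw [pvMemB, hmem]
    simp
  have hpw : (filter_known_phases_py_alt phases).Pairwise
      (fun a b =>
        (if a ∈ pvINTERNAL_PHASES
         then (((PySem.List.index? pvINTERNAL_PHASES a).getD 0 : Nat) : Int) else 999) <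
        (if b ∈ pvINTERNAL_PHASES
         then (((PySem.List.index? pvINTERNAL_PHASES b).getD 0 : Nat) : Int) else 999)) := by
    have hbase : pvINTERNAL_PHASES.Pairwise
        (fun a b =>
          (if a ∈ pvINTERNAL_PHASES
           then (((PySem.List.index? pvINTERNAL_PHASES a).getD 0 : Nat) : Int) else 999) <
          (if b ∈ pvINTERNAL_PHASES
           then (((PySem.List.index? pvINTERNAL_PHASES b).getD 0 : Nat) : Int) else 999)) := by
      decide
    exact hbase.sublist List.filter_sublist
  exact PySem.List.sorted_eq_of_perm_of_pairwise_lt _ _ _ hperm hpw
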